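-- pv_equiv track=rewrite | github.com/KNU-HAEDAL/2024-SS-small-group-ALSol | JYPARK/11to20/12.py | solution
-- ===== SOURCE A (Python) =====
-- def solution(prices):
--     length = len(prices)
--     answer = [0] * length
--
--     for i in range(length):
--         count = 0
--         for j in range(i, length):
--             if prices[i] <= prices[j]:
--                 count += 1
--         answer[i] = count-1
--
--     return answer
-- ===== SOURCE B (Python) =====
-- def solution(prices):
--     # Right-to-left scan keeping the already-seen suffix in a sorted list;
--     # a hand-rolled binary search gives the number of seen values < current,
--     # so len(seen) - lo is the count of later values >= prices[i].
--     answer = []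
--     seen = []  # sorted ascending
--     for v in reversed(prices):
--         lo, hi = 0, len(seen)
--         while lo < hi:
--             mid = (lo + hi) // 2
--             if seen[mid] < v:
--                 lo = mid + 1
--             else:
--                 hi = mid
--         answer.append(len(seen) - lo)
--         seen.insert(lo, v)
--     answer.reverse()
--     return answer
-- ===== Notes on version B (the rewrite author's own statement) =====
-- stated objective: faster
-- what changed: Replaced the nested O(n^2) index loops with a single right-to-left pass that keeps the already-seen suffix in a sorted list and counts values >= current via a hand-rolled binary search (len(seen) - bisect_left), building the answer back-to-front.
import Mathlib
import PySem

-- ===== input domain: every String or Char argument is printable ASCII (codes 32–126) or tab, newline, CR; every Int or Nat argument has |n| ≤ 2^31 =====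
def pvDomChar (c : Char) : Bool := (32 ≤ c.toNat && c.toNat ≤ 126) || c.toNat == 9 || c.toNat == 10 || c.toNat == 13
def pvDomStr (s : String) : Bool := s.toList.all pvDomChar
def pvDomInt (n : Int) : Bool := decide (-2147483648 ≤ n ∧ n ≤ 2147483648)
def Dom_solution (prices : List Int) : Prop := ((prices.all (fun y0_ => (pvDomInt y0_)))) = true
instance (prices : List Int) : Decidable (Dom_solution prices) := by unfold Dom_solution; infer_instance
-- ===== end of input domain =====

-- B replaces A's nested quadratic loops by one right-to-left pass over a sorted
-- suffix list with a binary search (objective: faster).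

-- ===== PORT A =====
def solution (prices : List Int) : List Int :=
  let length : Int := PySem.List.len prices
  let answer : List Int := PySem.List.pyRepeat [(0 : Int)] length
  (PySem.List.pyRange 0 length 1).foldl (fun answer i =>
    let count : Int := (PySem.List.pyRange i length 1).foldl
      (fun count j =>
        if PySem.List.pyGetD prices i 0 ≤ PySem.List.pyGetD prices j 0 then count + 1 else count)
      0
    PySem.List.pySetD answer i (count - 1)) answer

-- ===== PORT B =====
-- the 'while lo < hi' binary-search loop of Source B, recursion on the interval width
def solBl (seen : List Int) (v : Int) (lo hi : Int) : Int :=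
  if h : lo < hi then
    let mid := PySem.Int.floordiv (lo + hi) 2
    if PySem.List.pyGetD seen mid 0 < v then solBl seen v (mid + 1) hi
    else solBl seen v lo mid
  else lo
termination_by (hi - lo).toNat
decreasing_by
  · have _hb := PySem.Int.floordiv_two_mid_bounds (le_of_lt h)
    omega
  · have _hb := PySem.Int.floordiv_two_mid_bounds (le_of_lt h)
    have hlt : PySem.Int.floordiv (lo + hi) 2 < hi :=
      (PySem.Int.floordiv_lt_iff_lt_mul (by omega)).mpr (by omega)
    omega

-- one iteration of Source B's for-loop body, state = (answer, seen)
def solStep (p : List Int × List Int) (v : Int) : List Int × List Int :=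
  let lo := solBl p.2 v 0 (PySem.List.len p.2)
  (p.1 ++ [PySem.List.len p.2 - lo], PySem.List.insert p.2 lo v)

def solution_alt (prices : List Int) : List Int :=
  let p := prices.reverse.foldl solStep ([], [])
  p.1.reverse

-- ===== PRECONDITION & SPEC =====
def Spec_solution (prices : List Int) (out : List Int) : Prop := out = solution_alt prices
instance (prices : List Int) (out : List Int) : Decidable (Spec_solution prices out) := by unfold Spec_solution; infer_instance

-- ===== CLAIM (what is proved, stated in full; the proofs are below) =====
def Claim_equal_solution : Prop := ∀ (prices : List Int), Dom_solution prices → Spec_solution prices (solution prices)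

-- ===== LEMMAS AND PROOFS =====

-- the common specification: answer[i] = #{j > i | prices[i] ≤ prices[j]}
def specS : List Int → List Int
  | [] => []
  | v :: t => ((t.countP (fun x => decide (v ≤ x)) : Nat) : Int) :: specS t

theorem specS_length (l : List Int) : (specS l).length = l.length := by
  induction l with
  | nil => rfl
  | cons v t ih => simp [specS, ih]

theorem specS_getElem (l : List Int) (k : Nat) (h : k < l.length) :
    (specS l)[k]'(by rw [specS_length]; exact h)
      = (((l.drop (k+1)).countP (fun x => decide (l[k] ≤ x)) : Nat) : Int) := by
  induction l generalizing k with
  | nil => simp at h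
  | cons v t ih =>
    cases k with
    | zero => rfl
    | succ k => simpa [specS] using ih k (by simpa using h)

-- ---- A-side ----

theorem setfold (g : Int → Int) : ∀ (k : Nat) (acc : List Int), k ≤ acc.length →
    (PySem.List.pyRange 0 (k : Int) 1).foldl (fun ans i => PySem.List.pySetD ans i (g i)) acc
      = (List.range k).map (fun i : Nat => g (i : Int)) ++ acc.drop k := by
  intro k
  induction k with
  | zero => intro acc _; simp [PySem.List.pyRange_one_eq_nil (le_refl 0)]
  | succ k ih =>
    intro acc hk
    have hcast : ((k + 1 : Nat) : Int) = (k : Int) + 1 := by push_cast; ring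
    rw [hcast, PySem.List.pyRange_one_succ_right (by positivity), List.foldl_append,
      ih acc (by omega)]
    simp only [List.foldl_cons, List.foldl_nil, PySem.List.pySetD_natCast]
    have hlen : ((List.range k).map (fun i : Nat => g (i : Int))).length = k := by simp
    rw [List.set_append_right _ _ (by omega), List.range_succ, List.map_append]
    have hdrop : acc.drop k = acc[k] :: acc.drop (k+1) :=
      List.drop_eq_getElem_cons (by omega)
    simp only [hlen, Nat.sub_self]
    rw [hdrop, List.set_cons_zero, List.append_assoc, List.map_singleton, List.singleton_append]

theorem solution_eq_specS (prices : List Int) : solution prices = specS prices := by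
  have hsf := setfold (fun i : Int =>
      ((PySem.List.pyRange i ((prices.length : Nat) : Int) 1).foldl
        (fun count j =>
          if PySem.List.pyGetD prices i 0 ≤ PySem.List.pyGetD prices j 0 then count + 1 else count)
        0) - 1) prices.length (PySem.List.pyRepeat [(0 : Int)] ((prices.length : Nat) : Int)) (by
      simp [PySem.List.pyRepeat_singleton])
  show (PySem.List.pyRange 0 (PySem.List.len prices) 1).foldl
      (fun answer i => PySem.List.pySetD answer i
        (((PySem.List.pyRange i (PySem.List.len prices) 1).foldl
          (fun count j =>
            if PySem.List.pyGetD prices i 0 ≤ PySem.List.pyGetD prices j 0 then count + 1 else count)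
          0) - 1))
      (PySem.List.pyRepeat [(0 : Int)] (PySem.List.len prices)) = specS prices
  rw [PySem.List.len_eq, hsf]
  apply List.ext_getElem
  · simp [specS_length, PySem.List.pyRepeat_singleton]
  intro k hk1 hk2
  have hk : k < prices.length := by
    simpa [specS_length, PySem.List.pyRepeat_singleton] using hk2
  rw [specS_getElem prices k hk]
  rw [List.getElem_append_left (by simpa using hk), List.getElem_map]
  simp only [List.getElem_range]
  rw [PySem.List.foldl_pyRange_pyGetD' prices 0
      (fun c x => if PySem.List.pyGetD prices (k : Int) 0 ≤ x then c + 1 else c) 0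
      (by positivity),
    PySem.List.foldl_ite_add_one (fun x => PySem.List.pyGetD prices (k : Int) 0 ≤ x)]
  rw [PySem.List.pyGetD_natCast, List.getD_eq_getElem prices 0 hk]
  have hdrop : prices.drop k = prices[k] :: prices.drop (k+1) :=
    List.drop_eq_getElem_cons hk
  rw [Int.toNat_natCast, hdrop, List.countP_cons]
  simp

-- ---- B-side ----

theorem bl_spec (seen : List Int) (v : Int) (hs : seen.Pairwise (· ≤ ·)) :
    ∀ (N : Nat) (lo hi : Int), (hi - lo).toNat ≤ N →
    0 ≤ lo → lo ≤ hi → hi ≤ seen.length →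
    (∀ i : Nat, (_ : i < seen.length) → (i : Int) < lo → seen[i] < v) →
    (∀ i : Nat, (hilen : i < seen.length) → hi ≤ (i : Int) → v ≤ seen[i]) →
    solBl seen v lo hi = ((seen.countP (fun x => decide (x < v)) : Nat) : Int) := by
  intro N
  induction N with
  | zero =>
    intro lo hi hN h0 hlh hhl hlow hhigh
    have heq : lo = hi := by omega
    rw [solBl, dif_neg (by omega)]
    subst heq
    have h1 : (seen.take lo.toNat).countP (fun x => decide (x < v)) = lo.toNat := by
      rw [List.countP_eq_length.mpr, List.length_take]
      · omega
      · intro a ha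
        obtain ⟨i, hi2, rfl⟩ := List.getElem_of_mem ha
        rw [List.getElem_take]
        simp only [decide_eq_true_eq]
        exact hlow i (by simp at hi2; omega) (by simp at hi2; omega)
    have h2 : (seen.drop lo.toNat).countP (fun x => decide (x < v)) = 0 := by
      rw [List.countP_eq_zero]
      intro a ha
      obtain ⟨i, hi2, rfl⟩ := List.getElem_of_mem ha
      rw [List.getElem_drop]
      simp only [decide_eq_true_eq, not_lt]
      exact hhigh (lo.toNat + i) (by simp at hi2; omega) (by omega)
    conv_rhs => rw [← List.take_append_drop lo.toNat seen]
    rw [List.countP_append, h1, h2]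
    omega
  | succ N ih =>
    intro lo hi hN h0 hlh hhl hlow hhigh
    by_cases hcase : lo < hi
    · rw [solBl]
      simp only [dif_pos hcase]
      have hb := PySem.Int.floordiv_two_mid_bounds (le_of_lt hcase)
      have hmidlt : PySem.Int.floordiv (lo + hi) 2 < hi :=
        (PySem.Int.floordiv_lt_iff_lt_mul (by omega)).mpr (by omega)
      set mid : Int := PySem.Int.floordiv (lo + hi) 2 with hmid
      have hmrange : mid.toNat < seen.length := by omega
      have hget : PySem.List.pyGetD seen mid 0 = seen[mid.toNat] := by
        rw [PySem.List.pyGetD_of_nonneg seen 0 (by omega),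
          List.getD_eq_getElem seen 0 hmrange]
      rw [hget]
      have hmono := List.pairwise_iff_getElem.mp hs
      split_ifs with hvm
      · apply ih (mid + 1) hi (by omega) (by omega) (by omega) hhl
        · intro i hilen hlt
          rcases Nat.lt_or_ge i mid.toNat with h | h
          · exact lt_of_le_of_lt (hmono i mid.toNat hilen hmrange h) hvm
          · have : i = mid.toNat := by omega
            subst this; exact hvm
        · exact hhigh
      · apply ih lo mid (by omega) (by omega) (by omega) (by omega) hlow
        intro i hilen hle
        have hv : v ≤ seen[mid.toNat] := by omega
        rcases Nat.lt_or_ge mid.toNat i with h | h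
        · exact le_trans hv (hmono mid.toNat i hmrange hilen h)
        · have : i = mid.toNat := by omega
          subst this; exact hv
    · exact ih lo hi (by omega) h0 hlh hhl hlow hhigh

def specT : List Int → List Int → List Int
  | [], _ => []
  | v :: t, s =>
      ((s.length : Int) - ((s.countP (fun x => decide (x < v)) : Nat) : Int)) :: specT t (v :: s)

theorem sorted_dropWhile_ge (v : Int) (l : List Int) :
    l.Pairwise (· ≤ ·) → ∀ x ∈ l.dropWhile (fun x => decide (x < v)), v ≤ x := by
  induction l with
  | nil => intro _ x hx; simp at hx
  | cons a t ih =>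
    intro hl x hx
    rw [List.pairwise_cons] at hl
    rw [List.dropWhile_cons] at hx
    by_cases ha : a < v
    · exact ih hl.2 x (by simpa [ha] using hx)
    · simp only [ha, decide_false, Bool.false_eq_true, if_false] at hx
      rcases List.mem_cons.mp hx with rfl | hx2
      · omega
      · have := hl.1 x hx2; omega

theorem insert_at_count (seen : List Int) (v : Int) (hs : seen.Pairwise (· ≤ ·)) :
    (PySem.List.insert seen ((seen.countP (fun x => decide (x < v)) : Nat) : Int) v).Pairwise (· ≤ ·) ∧
    (PySem.List.insert seen ((seen.countP (fun x => decide (x < v)) : Nat) : Int) v).Perm (v :: seen) := by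
  set p : Int → Bool := fun x => decide (x < v) with hp
  have hsplit : seen.takeWhile p ++ seen.dropWhile p = seen := List.takeWhile_append_dropWhile
  have htw_all : ∀ x ∈ seen.takeWhile p, x < v := by
    intro x hx
    have := List.mem_takeWhile_imp hx
    simpa [hp] using this
  have hdw_all : ∀ x ∈ seen.dropWhile p, v ≤ x := sorted_dropWhile_ge v seen hs
  have hc : seen.countP p = (seen.takeWhile p).length := by
    conv_lhs => rw [← hsplit]
    rw [List.countP_append, List.countP_eq_length.mpr (fun a ha => by
        simpa [hp] using htw_all a ha),
      List.countP_eq_zero.mpr (fun a ha => by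
        have := hdw_all a ha; simp [hp]; omega)]
    omega
  have hle : seen.countP p ≤ seen.length := List.countP_le_length
  have hins : PySem.List.insert seen ((seen.countP p : Nat) : Int) v
      = seen.takeWhile p ++ v :: seen.dropWhile p := by
    rw [PySem.List.insert_natCast seen _ v hle, hc]
    have key : ∀ tw dw : List Int, tw ++ dw = seen →
        List.take tw.length seen ++ v :: List.drop tw.length seen = tw ++ v :: dw := by
      intro tw dw h
      subst h
      rw [List.take_left, List.drop_left]
    exact key _ _ hsplit
  constructor
  · rw [hins, List.pairwise_append]
    refine ⟨hs.sublist (List.takeWhile_sublist p), ?_, ?_⟩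
    · rw [List.pairwise_cons]
      exact ⟨hdw_all, hs.sublist (List.dropWhile_sublist p)⟩
    · intro x hx y hy
      have hxv := htw_all x hx
      rcases List.mem_cons.mp hy with rfl | hy2
      · omega
      · have := hdw_all y hy2; omega
  · rw [hins]
    have hmid := List.perm_middle (a := v) (l₁ := seen.takeWhile p) (l₂ := seen.dropWhile p)
    rw [hsplit] at hmid
    exact hmid

theorem fold_eq : ∀ (l ans seen s : List Int), seen.Pairwise (· ≤ ·) → seen.Perm s →
    (l.foldl solStep (ans, seen)).1 = ans ++ specT l s := by
  intro l
  induction l with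
  | nil => intro ans seen s _ _; simp [specT]
  | cons v t ih =>
    intro ans seen s hs hperm
    rw [List.foldl_cons]
    have hbl : solBl seen v 0 (PySem.List.len seen)
        = ((seen.countP (fun x => decide (x < v)) : Nat) : Int) := by
      rw [PySem.List.len_eq]
      exact bl_spec seen v hs ((seen.length : Int) - 0).toNat 0 (seen.length : Int)
        le_rfl le_rfl (by positivity) le_rfl
        (fun i _ h => absurd h (by omega))
        (fun i hilen h => absurd h (by omega))
    have hstep : solStep (ans, seen) v
        = (ans ++ [(PySem.List.len seen) - ((seen.countP (fun x => decide (x < v)) : Nat) : Int)],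
           PySem.List.insert seen ((seen.countP (fun x => decide (x < v)) : Nat) : Int) v) := by
      simp only [solStep, hbl]
    rw [hstep]
    obtain ⟨hsorted', hperm'⟩ := insert_at_count seen v hs
    rw [ih _ _ (v :: s) hsorted' (hperm'.trans (hperm.cons v))]
    have hcount : seen.countP (fun x => decide (x < v)) = s.countP (fun x => decide (x < v)) :=
      hperm.countP_eq _
    have hlen : seen.length = s.length := hperm.length_eq
    simp [specT, PySem.List.len_eq, hcount, hlen]

def specT2 : List Int → List Int
  | [] => []
  | v :: t =>
      ((t.length : Int) - ((t.countP (fun x => decide (x < v)) : Nat) : Int)) :: specT2 t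

theorem specT_append (xs ys s : List Int) :
    specT (xs ++ ys) s = specT xs s ++ specT ys (xs.reverse ++ s) := by
  induction xs generalizing s with
  | nil => simp [specT]
  | cons v t ih =>
    simp only [List.cons_append, specT, ih (v :: s), List.reverse_cons]
    simp [List.append_assoc]

theorem specT_rev (l : List Int) : (specT l.reverse []).reverse = specT2 l := by
  induction l with
  | nil => simp [specT, specT2]
  | cons v t ih =>
    rw [List.reverse_cons, specT_append, List.reverse_reverse]
    simp [specT, specT2, ih]

theorem specT2_eq_specS (l : List Int) : specT2 l = specS l := by
  induction l with
  | nil => rfl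
  | cons v t ih =>
    simp only [specT2, specS, ih]
    congr 1
    have h := List.length_eq_countP_add_countP (l := t) (fun x => decide (x < v))
    have h2 : t.countP (fun a => decide (¬ decide (a < v) = true)) = t.countP (fun x => decide (v ≤ x)) := by
      apply List.countP_congr
      intro x _
      simp [not_lt]
    omega

theorem solution_alt_eq_specS (prices : List Int) : solution_alt prices = specS prices := by
  have h := fold_eq prices.reverse [] [] [] (by simp) (by simp)
  show (prices.reverse.foldl solStep ([], [])).1.reverse = _
  rw [h]
  simpa [specT_rev prices] using specT2_eq_specS prices

-- ===== VERDICT (by name: the statement is the Claim_ definition above) =====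
theorem solution_spec : Claim_equal_solution := by
  intro prices _
  unfold Spec_solution
  rw [solution_eq_specS, solution_alt_eq_specS]
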